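-- pv_equiv track=rewrite | github.com/camh2000/final_project_cs412 | exact_solution.py | held_karp_tsp
-- ===== SOURCE A (Python) =====
-- import itertools
--
-- def held_karp_tsp(graph):
--     n = len(graph)
--     C = {}
--
--     # Initialize base cases
--     for k in range(1, n):
--         C[(1 << k, k)] = (graph[0][k], [0, k])
--
--     # Fill in the remaining subproblems
--     for subset_size in range(2, n):
--         for subset in itertools.combinations(range(1, n), subset_size):
--             bits = 0
--             for bit in subset:
--                 bits |= 1 << bit
--             for k in subset:
--                 prev = bits & ~(1 << k)
--                 res = []
--                 for m in subset:
--                     if m == 0 or m == k: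
--                         continue
--                     res.append((C[(prev, m)][0] + graph[m][k], C[(prev, m)][1] + [k]))
--                 C[(bits, k)] = min(res)
--
--     # Now, consider the subset that contains all the vertices, except 0, ending with any vertex
--     res = []
--     bits = (2**n - 1) - 1
--     for k in range(1, n):
--         res.append((C[(bits, k)][0] + graph[k][0], C[(bits, k)][1] + [0]))
--     opt, path = min(res)
--     return opt, path
-- ===== SOURCE B (Python) =====
-- def held_karp_tsp(graph):
--     n = len(graph)
--     memo = {}
--
--     def best(mask, k):
--         # cost and path of the cheapest 0 -> k walk visiting exactly the set `mask`
--         # (vertices 1..n-1 encoded as bits; k is in mask)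
--         if (mask, k) in memo:
--             return memo[(mask, k)]
--         if mask == 1 << k:
--             r = (graph[0][k], [0, k])
--         else:
--             prev = mask ^ (1 << k)
--             r = min((best(prev, m)[0] + graph[m][k], best(prev, m)[1] + [k])
--                     for m in range(1, n) if (prev >> m) & 1)
--         memo[(mask, k)] = r
--         return r
--
--     full = (1 << n) - 2
--     return min((best(full, k)[0] + graph[k][0], best(full, k)[1] + [0])
--                for k in range(1, n))
-- ===== Notes on version B (the rewrite author's own statement) =====
-- stated objective: alternative
-- what changed: Replaces A's bottom-up staged dynamic programming (explicit table filled size-by-size over itertools.combinations, with bitmasks re-derived from each subset tuple and candidate lists passed to min()) by a top-down recursive formulation: a self-recursive best(mask, k) defined by the Held-Karp recurrence, memoised in a dict, driven only by the final min over end vertices, so no subset enumeration or stage loop exists at all.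
import Mathlib
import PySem

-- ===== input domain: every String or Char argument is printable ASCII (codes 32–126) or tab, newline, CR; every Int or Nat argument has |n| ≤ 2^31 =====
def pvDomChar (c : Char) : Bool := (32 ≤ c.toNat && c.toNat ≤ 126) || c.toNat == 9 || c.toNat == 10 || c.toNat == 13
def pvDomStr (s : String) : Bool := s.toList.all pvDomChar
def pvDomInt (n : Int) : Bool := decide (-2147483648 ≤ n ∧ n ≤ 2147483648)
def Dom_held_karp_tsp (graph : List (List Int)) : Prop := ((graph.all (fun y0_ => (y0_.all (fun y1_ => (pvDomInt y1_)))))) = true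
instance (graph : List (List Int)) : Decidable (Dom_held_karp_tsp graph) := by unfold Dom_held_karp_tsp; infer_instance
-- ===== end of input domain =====

-- B replaces A's bottom-up staged table (sizes 2..n-1 over itertools.combinations) by a
-- top-down recursive best(mask, k) implementing the Held-Karp recurrence with a memo
-- dict, driven only by the final min over end vertices; same results, proved equal below.

-- Python's `<` on lists of ints (lexicographic, strict)
def listLt : List Int → List Int → Bool
  | [], [] => false
  | [], _ :: _ => true
  | _ :: _, [] => false
  | a :: as, b :: bs => if a < b then true else if b < a then false else listLt as bs

-- Python's `<` on (int, list[int]) tuples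
def pairLt (x y : Int × List Int) : Bool :=
  decide (x.1 < y.1) || (decide (x.1 = y.1) && listLt x.2 y.2)

-- Python's min() on a nonempty list of (int, list[int]) tuples (first minimal element);
-- [] gives a junk value: Python raises ValueError there (excluded by Pre_)
def pyMin : List (Int × List Int) → Int × List Int
  | [] => (0, [])
  | x :: t => t.foldl (fun b c => if pairLt c b then c else b) x

-- graph[i][j] for 0 ≤ i, j; Pre_ guarantees both indices in range, so getD is exact
def gE (g : List (List Int)) (i j : Nat) : Int := (g.getD i []).getD j 0

-- ===== PORT A =====
-- notes on exactness: masks are nonnegative Python ints, kept as Nat;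
--   `bits & ~(1 << k)` is ported as `bits ^^^ (1 <<< k)` — exact because k is always a
--   member of `subset`, so bit k of `bits` is set; dict accesses C[...] are ported with
--   getD — Pre_ guarantees every key is present (A itself never hits a KeyError);
--   itertools.combinations is PySem.List.combinations; range(1, n) over Nat is
--   List.range' 1 (n-1), range(2, n) is List.range' 2 (n-2).
def held_karp_tsp (graph : List (List Int)) : Int × List Int :=
  let n := graph.length
  -- base cases: for k in range(1, n): C[(1 << k, k)] = (graph[0][k], [0, k])
  let C : PySem.Dict (Nat × Nat) (Int × List Int) :=
    (List.range' 1 (n - 1)).foldl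
      (fun C k => C.insert (1 <<< k, k) (gE graph 0 k, [0, (k : Int)])) PySem.Dict.empty
  -- for subset_size in range(2, n): for subset in combinations(range(1, n), subset_size): …
  let C := (List.range' 2 (n - 2)).foldl (fun C s =>
    (PySem.List.combinations (List.range' 1 (n - 1)) s).foldl (fun C subset =>
      let bits := subset.foldl (fun b bit => b ||| (1 <<< bit)) 0
      subset.foldl (fun C k =>
        let prev := bits ^^^ (1 <<< k)
        let res := subset.foldl (fun r m =>
          if m = 0 ∨ m = k then r
          else r ++ [((C.getD (prev, m) (0, [])).1 + gE graph m k,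
                      (C.getD (prev, m) (0, [])).2 ++ [(k : Int)])])
          ([] : List (Int × List Int))
        C.insert (bits, k) (pyMin res)) C) C) C
  -- bits = (2**n - 1) - 1; res over k in range(1, n); return min(res)
  let bits := 2 ^ n - 1 - 1
  let res := (List.range' 1 (n - 1)).foldl (fun r k =>
      r ++ [((C.getD (bits, k) (0, [])).1 + gE graph k 0,
             (C.getD (bits, k) (0, [])).2 ++ [(0 : Int)])]) ([] : List (Int × List Int))
  pyMin res

-- ===== PORT B =====
-- Source B's recursive best(mask, k); the memo dict only caches values of this very
-- recursion (it never changes any value), so the port is the bare recursion, with a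
-- fuel argument bounding the depth: every recursive call Source B makes goes from mask to
-- prev = mask ^ (1 << k) < mask (bit k of mask is set on every reachable call), so the
-- caller's fuel of 2^n > full mask is never exhausted on the entries the result reads.
-- `(prev >> m) & 1` is Nat.testBit; min over the generator (in increasing m, first
-- minimal kept) is pyMin of the mapped filter, exact including tie-breaking.
def bestB (g : List (List Int)) (n : Nat) : Nat → Nat → Nat → Int × List Int
  | 0, _, _ => (0, [])  -- fuel exhausted: unreachable from the calls the result reads
  | fu + 1, mask, k =>
    if mask = 1 <<< k then (gE g 0 k, [0, (k : Int)])
    else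
      let prev := mask ^^^ (1 <<< k)
      pyMin (((List.range' 1 (n - 1)).filter (fun m => prev.testBit m)).map
        (fun m => ((bestB g n fu prev m).1 + gE g m k,
                   (bestB g n fu prev m).2 ++ [(k : Int)])))

def held_karp_tsp_alt (graph : List (List Int)) : Int × List Int :=
  let n := graph.length
  let full := 2 ^ n - 2
  pyMin ((List.range' 1 (n - 1)).map (fun k =>
    ((bestB graph n (2 ^ n) full k).1 + gE graph k 0,
     (bestB graph n (2 ^ n) full k).2 ++ [(0 : Int)])))

-- ===== PRECONDITION & SPEC =====
-- Pre_ is exactly where the Python A returns: n ≥ 2 (min([]) raises ValueError for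
-- n ≤ 1, in B too), and every row long enough for the entries A reads (rows 0..n-2 are
-- read at column n-1, the last row only up to column n-2), excluding A's IndexError inputs.
def Pre_held_karp_tsp (graph : List (List Int)) : Prop :=
  2 ≤ graph.length ∧ (∀ row ∈ graph.dropLast, graph.length ≤ row.length) ∧
    graph.length - 1 ≤ ((graph.getLast?).getD []).length
instance (graph : List (List Int)) : Decidable (Pre_held_karp_tsp graph) := by
  unfold Pre_held_karp_tsp; infer_instance

def pvWitness_held_karp_tsp : List (List Int) := [[0, 1], [2, 0]]

def Spec_held_karp_tsp (graph : List (List Int)) (out : Int × List Int) : Prop :=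
  out = held_karp_tsp_alt graph
instance (graph : List (List Int)) (out : Int × List Int) : Decidable (Spec_held_karp_tsp graph out) := by
  unfold Spec_held_karp_tsp; infer_instance

-- ===== CLAIM (what is proved, stated in full; the proofs are below) =====
def Claim_equal_held_karp_tsp : Prop := ∀ (graph : List (List Int)), Dom_held_karp_tsp graph → Pre_held_karp_tsp graph → Spec_held_karp_tsp graph (held_karp_tsp graph)

-- ===== LEMMAS AND PROOFS =====

-- the Held-Karp value/path of (mask, k): B's recursion at its own sufficient fuel
def bestSpec (g : List (List Int)) (n : Nat) (mask k : Nat) : Int × List Int :=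
  bestB g n (mask + 1) mask k

def elemsOf (n mask : Nat) : List Nat :=
  (List.range' 1 (n - 1)).filter (fun m => mask.testBit m)

def bitsOf (l : List Nat) : Nat := l.foldl (fun b x => b ||| (1 <<< x)) 0

-- every entry the dict holds is the Held-Karp value of its key
def Sound (g : List (List Int)) (n : Nat) (C : PySem.Dict (Nat × Nat) (Int × List Int)) : Prop :=
  ∀ mask k v, C.get? (mask, k) = some v → v = bestSpec g n mask k

def Keep (C C' : PySem.Dict (Nat × Nat) (Int × List Int)) : Prop :=
  ∀ q, (C.get? q).isSome → (C'.get? q).isSome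

-- ---- small generic lemmas ----

theorem keep_refl (C : PySem.Dict (Nat × Nat) (Int × List Int)) : Keep C C := fun _ h => h

theorem keep_trans {C1 C2 C3 : PySem.Dict (Nat × Nat) (Int × List Int)}
    (h1 : Keep C1 C2) (h2 : Keep C2 C3) : Keep C1 C3 := fun q h => h2 q (h1 q h)

theorem keep_insert (C : PySem.Dict (Nat × Nat) (Int × List Int)) (q : Nat × Nat)
    (v : Int × List Int) : Keep C (C.insert q v) := by
  intro p h
  rw [PySem.Dict.get?_insert]
  split <;> simp_all

theorem sound_insert {g : List (List Int)} {n : Nat}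
    {C : PySem.Dict (Nat × Nat) (Int × List Int)} {mask k : Nat} {v : Int × List Int}
    (hs : Sound g n C) (hv : v = bestSpec g n mask k) : Sound g n (C.insert (mask, k) v) := by
  intro mask' k' v' h
  rw [PySem.Dict.get?_insert] at h
  split at h
  · rename_i heq
    simp only [Prod.mk.injEq] at heq
    obtain ⟨h1, h2⟩ := heq
    subst h1; subst h2
    cases h; exact hv
  · exact hs mask' k' v' h

theorem sound_getD {g : List (List Int)} {n : Nat}
    {C : PySem.Dict (Nat × Nat) (Int × List Int)} {mask k : Nat}
    (hs : Sound g n C) (h : (C.get? (mask, k)).isSome) :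
    C.getD (mask, k) (0, []) = bestSpec g n mask k := by
  obtain ⟨v, hv⟩ := Option.isSome_iff_exists.mp h
  rw [PySem.Dict.getD_eq_get?_getD, hv]
  exact hs mask k v hv

theorem isSome_insert_self (C : PySem.Dict (Nat × Nat) (Int × List Int)) (q : Nat × Nat)
    (v : Int × List Int) : ((C.insert q v).get? q).isSome := by
  rw [PySem.Dict.get?_insert_self]; rfl

-- ---- fold-shape lemma for A's res loop ----

theorem foldl_skip_append (p : Nat → Prop) [DecidablePred p] (f : Nat → Int × List Int)
    (l : List Nat) : ∀ init, l.foldl (fun r m => if p m then r else r ++ [f m]) init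
      = init ++ (l.filter (fun m => !decide (p m))).map f := by
  induction l with
  | nil => intro init; simp
  | cons x xs ih =>
    intro init
    by_cases hx : p x <;> simp [hx, ih, List.append_assoc]

-- ---- bit lemmas ----

theorem testBit_shl_one (k i : Nat) : (1 <<< k).testBit i = decide (k = i) := by
  rw [Nat.one_shiftLeft]
  simp [Nat.testBit_two_pow]

theorem xor_shl_lt {mask k : Nat} (h : mask.testBit k = true) : mask ^^^ (1 <<< k) < mask := by
  apply Nat.lt_of_testBit k
  · rw [Nat.testBit_xor, testBit_shl_one, h]
    simp
  · exact h
  · intro j hj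
    rw [Nat.testBit_xor, testBit_shl_one, decide_eq_false (by omega : ¬ k = j)]
    simp

theorem testBit_bitsOf (l : List Nat) (i : Nat) : (bitsOf l).testBit i = decide (i ∈ l) := by
  unfold bitsOf
  suffices h : ∀ a : Nat, (l.foldl (fun b x => b ||| (1 <<< x)) a).testBit i
      = (a.testBit i || decide (i ∈ l)) by
    rw [h 0]; simp
  induction l with
  | nil => intro a; simp
  | cons x xs ih =>
    intro a
    simp only [List.foldl_cons, ih, Nat.testBit_or, testBit_shl_one, List.mem_cons]
    by_cases hx : x = i <;> by_cases hm : i ∈ xs <;> simp [hx, hm] <;> tauto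

theorem filter_mem_sublist {t l : List Nat} (h : t.Sublist l) (hn : l.Nodup) :
    l.filter (fun x => decide (x ∈ t)) = t := by
  induction h with
  | slnil => rfl
  | @cons l₁ l₂ a h ih =>
    have hnd := (List.nodup_cons.mp hn).2
    have ha := (List.nodup_cons.mp hn).1
    have hat : a ∉ l₁ := fun hmem => ha (h.mem hmem)
    simp only [List.filter_cons, decide_eq_false hat, cond_false]
    exact ih hnd
  | @cons₂ l₁ l₂ a h ih =>
    have hnd := (List.nodup_cons.mp hn).2
    have ha := (List.nodup_cons.mp hn).1
    have hstep : List.filter (fun x => decide (x ∈ a :: l₁)) l₂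
        = List.filter (fun x => decide (x ∈ l₁)) l₂ := by
      apply List.filter_congr
      intro x hx
      have hxa : x ≠ a := fun hh => ha (hh ▸ hx)
      simp [List.mem_cons, hxa]
    simp only [List.filter_cons, decide_eq_true (List.mem_cons_self : a ∈ a :: l₁)]
    simp only [if_true, cond_true, hstep, ih hnd]

theorem elemsOf_bitsOf {n : Nat} {t : List Nat} (h : t.Sublist (List.range' 1 (n - 1))) :
    elemsOf n (bitsOf t) = t := by
  unfold elemsOf
  rw [List.filter_congr (fun x _ => testBit_bitsOf t x)]
  exact filter_mem_sublist h (List.nodup_range' ..)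

theorem prev_eq_bitsOf_filter {t : List Nat} {k : Nat} (hk : k ∈ t) :
    bitsOf t ^^^ (1 <<< k) = bitsOf (t.filter (fun m => !decide (m = k))) := by
  apply Nat.eq_of_testBit_eq
  intro i
  rw [Nat.testBit_xor, testBit_shl_one, testBit_bitsOf, testBit_bitsOf]
  by_cases hik : k = i
  · subst hik
    have : k ∉ t.filter (fun m => !decide (m = k)) := by
      intro hmem
      have := List.of_mem_filter hmem
      simp at this
    simp [hk, this]
  · have hiff : (i ∈ t.filter (fun m => !decide (m = k))) ↔ i ∈ t := by
      rw [List.mem_filter]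
      exact ⟨fun h => h.1, fun h => ⟨h, by simp; exact fun hh => hik hh.symm⟩⟩
    by_cases hm : i ∈ t <;> simp [hik, hm, hiff]

theorem testBit_two_pow_sub_two (n i : Nat) :
    (2 ^ n - 2).testBit i = decide (1 ≤ i ∧ i < n) := by
  cases n with
  | zero =>
    have h0 : (2:Nat)^0 - 2 = 0 := by norm_num
    rw [h0, Nat.zero_testBit]
    have : ¬ (1 ≤ i ∧ i < 0) := by omega
    simp [this]
  | succ m =>
    have h1 : (2:Nat) ^ (m + 1) - 2 = (2 ^ m - 1) * 2 ^ 1 := by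
      have : (2:Nat)^m ≥ 1 := Nat.one_le_two_pow
      rw [pow_succ] at *
      omega
    rw [h1, Nat.testBit_mul_two_pow, Nat.testBit_two_pow_sub_one]
    by_cases hi : 1 ≤ i
    · by_cases h2 : i - 1 < m
      · have : 1 ≤ i ∧ i < m + 1 := by omega
        simp [hi, h2, this]
      · have : ¬ (1 ≤ i ∧ i < m + 1) := by omega
        simp [hi, h2, this]
        omega
    · have : ¬ (1 ≤ i ∧ i < m + 1) := by omega
      simp [hi, this]

theorem bitsOf_range' (n : Nat) : bitsOf (List.range' 1 (n - 1)) = 2 ^ n - 2 := by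
  apply Nat.eq_of_testBit_eq
  intro i
  rw [testBit_bitsOf, testBit_two_pow_sub_two]
  by_cases hm : i ∈ List.range' 1 (n - 1)
  · have := List.mem_range'_1.mp hm
    simp [hm]; omega
  · have hno := fun (h1 : 1 ≤ i) (h2 : i < 1 + (n-1)) => hm (List.mem_range'_1.mpr ⟨h1, h2⟩)
    have : ¬ (1 ≤ i ∧ i < n) := by
      rintro ⟨h1, h2⟩
      exact hno h1 (by omega)
    simp [hm, this]

-- ---- bestB fuel-independence and unfolding ----

theorem bestB_congr (g : List (List Int)) (n : Nat) :
    ∀ mask fu fu' k, mask.testBit k = true → mask < fu → mask < fu' →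
      bestB g n fu mask k = bestB g n fu' mask k := by
  intro mask
  induction mask using Nat.strong_induction_on with
  | _ mask ih =>
    intro fu fu' k htb h1 h2
    cases fu with
    | zero => omega
    | succ fa =>
    cases fu' with
    | zero => omega
    | succ fb =>
    simp only [bestB]
    by_cases hb : mask = 1 <<< k
    · rw [if_pos hb, if_pos hb]
    · rw [if_neg hb, if_neg hb]
      have hprevlt : mask ^^^ (1 <<< k) < mask := xor_shl_lt htb
      congr 1
      apply List.map_congr_left
      intro m hm
      have hmtb : (mask ^^^ (1 <<< k)).testBit m = true := by
        have := (List.mem_filter.mp hm).2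
        simpa using this
      rw [ih _ hprevlt fa fb m hmtb (by omega) (by omega)]

theorem bestSpec_base (g : List (List Int)) (n k : Nat) :
    bestSpec g n (1 <<< k) k = (gE g 0 k, [0, (k : Int)]) := by
  simp [bestSpec, bestB]

theorem exists_other {t : List Nat} {k : Nat} (hn : t.Nodup) (hl : 2 ≤ t.length) :
    ∃ m ∈ t, m ≠ k := by
  match t, hl with
  | a :: b :: rest, _ =>
    have hab : a ≠ b := by
      have := List.nodup_cons.mp hn
      exact fun h => this.1 (h ▸ List.mem_cons_self)
    by_cases hak : a = k
    · exact ⟨b, List.mem_cons_of_mem _ List.mem_cons_self, fun h => hab (by omega)⟩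
    · exact ⟨a, List.mem_cons_self, hak⟩

-- the central characterisation: the Held-Karp value of a subset t and endpoint k is the
-- Python min over the candidate list built from t's other members, in t's order
theorem cell_spec {g : List (List Int)} {n : Nat} {t : List Nat} {k : Nat}
    (ht : t.Sublist (List.range' 1 (n - 1))) (hk : k ∈ t) (hex : ∃ m ∈ t, m ≠ k) :
    bestSpec g n (bitsOf t) k =
      pyMin ((t.filter (fun m => !decide (m = k))).map
        (fun m => ((bestSpec g n (bitsOf t ^^^ (1 <<< k)) m).1 + gE g m k,
                   (bestSpec g n (bitsOf t ^^^ (1 <<< k)) m).2 ++ [(k : Int)]))) := by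
  obtain ⟨m0, hm0, hm0k⟩ := hex
  have hne : bitsOf t ≠ 1 <<< k := by
    intro h
    have htb := testBit_bitsOf t m0
    rw [h, testBit_shl_one] at htb
    simp [hm0] at htb
    exact hm0k htb.symm
  have htb : (bitsOf t).testBit k = true := by rw [testBit_bitsOf]; simp [hk]
  have hfilt : (List.range' 1 (n - 1)).filter (fun m => (bitsOf t ^^^ (1 <<< k)).testBit m)
      = t.filter (fun m => !decide (m = k)) := by
    have := elemsOf_bitsOf ((List.filter_sublist ..).trans ht)
      (n := n) (t := t.filter (fun m => !decide (m = k)))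
    rw [prev_eq_bitsOf_filter hk]
    exact this
  show bestB g n (bitsOf t + 1) (bitsOf t) k = _
  simp only [bestB, if_neg hne]
  rw [hfilt]
  congr 1
  apply List.map_congr_left
  intro m hm
  have hmtb : (bitsOf t ^^^ (1 <<< k)).testBit m = true := by
    rw [prev_eq_bitsOf_filter hk, testBit_bitsOf]
    simpa using hm
  have hprevlt : bitsOf t ^^^ (1 <<< k) < bitsOf t := xor_shl_lt htb
  rw [bestB_congr g n _ (bitsOf t) ((bitsOf t ^^^ (1 <<< k)) + 1) m hmtb (by omega) (by omega)]
  rfl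

theorem length_filter_ne {t : List Nat} {k : Nat} (hn : t.Nodup) (hk : k ∈ t) :
    (t.filter (fun m => !decide (m = k))).length = t.length - 1 := by
  induction t with
  | nil => cases hk
  | cons a rest ih =>
    have hnd := (List.nodup_cons.mp hn).2
    have ha := (List.nodup_cons.mp hn).1
    by_cases hak : a = k
    · subst hak
      rw [List.filter_cons_of_neg (by simp)]
      rw [List.filter_eq_self.mpr (fun x hx => by
        have : x ≠ a := fun h => ha (h ▸ hx)
        simp [this])]
      simp
    · have hkrest : k ∈ rest := by
        rcases List.mem_cons.mp hk with h | h
        · exact absurd h.symm hak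
        · exact h
      rw [List.filter_cons_of_pos (by simp [hak])]
      have hlen : 1 ≤ rest.length := List.length_pos_of_mem hkrest
      simp [ih hnd hkrest]
      omega

-- dict entries needed so far are present, for all subsets of size between 1 and s
def CompUpTo (n : Nat) (C : PySem.Dict (Nat × Nat) (Int × List Int)) (s : Nat) : Prop :=
  ∀ t : List Nat, t.Sublist (List.range' 1 (n - 1)) → 1 ≤ t.length → t.length ≤ s →
    ∀ k ∈ t, ((C.get? (bitsOf t, k)).isSome : Prop)

theorem compUpTo_keep {n : Nat} {C C' : PySem.Dict (Nat × Nat) (Int × List Int)} {s : Nat}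
    (h : CompUpTo n C s) (hk : Keep C C') : CompUpTo n C' s :=
  fun t h1 h2 h3 k hkk => hk _ (h t h1 h2 h3 k hkk)

-- ---- A-side loop invariants ----

theorem A_base (g : List (List Int)) (n : Nat) :
    ∀ (l : List Nat) (C : PySem.Dict (Nat × Nat) (Int × List Int)), Sound g n C →
      Sound g n (l.foldl (fun C k => C.insert (1 <<< k, k) (gE g 0 k, [0, (k : Int)])) C) ∧
      Keep C (l.foldl (fun C k => C.insert (1 <<< k, k) (gE g 0 k, [0, (k : Int)])) C) ∧
      ∀ j ∈ l, (((l.foldl (fun C k => C.insert (1 <<< k, k) (gE g 0 k, [0, (k : Int)])) C).get?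
        (1 <<< j, j)).isSome : Prop) := by
  intro l
  induction l with
  | nil => exact fun C hs => ⟨hs, keep_refl C, by simp⟩
  | cons x xs ih =>
    intro C hs
    simp only [List.foldl_cons]
    set C1 := C.insert (1 <<< x, x) (gE g 0 x, [0, (x : Int)]) with hC1
    have hs1 : Sound g n C1 := sound_insert hs (bestSpec_base g n x).symm
    obtain ⟨ha, hb, hc⟩ := ih C1 hs1
    refine ⟨ha, keep_trans (keep_insert C _ _) hb, ?_⟩
    intro j hj
    rcases List.mem_cons.mp hj with h | h
    · subst h
      exact hb _ (isSome_insert_self C _ _)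
    · exact hc j h

theorem A_val {g : List (List Int)} {n : Nat} {t : List Nat} {k : Nat}
    {C : PySem.Dict (Nat × Nat) (Int × List Int)}
    (ht : t.Sublist (List.range' 1 (n - 1))) (hk : k ∈ t) (hlen : 2 ≤ t.length)
    (hs : Sound g n C)
    (hprev : ∀ m ∈ t, m ≠ k → ((C.get? (bitsOf t ^^^ (1 <<< k), m)).isSome : Prop)) :
    pyMin (t.foldl (fun r m =>
      if m = 0 ∨ m = k then r
      else r ++ [((C.getD (bitsOf t ^^^ (1 <<< k), m) (0, [])).1 + gE g m k,
                  (C.getD (bitsOf t ^^^ (1 <<< k), m) (0, [])).2 ++ [(k : Int)])]) [])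
      = bestSpec g n (bitsOf t) k := by
  have hnd : t.Nodup := ht.nodup (List.nodup_range' ..)
  rw [foldl_skip_append (fun m => m = 0 ∨ m = k)
    (fun m => ((C.getD (bitsOf t ^^^ (1 <<< k), m) (0, [])).1 + gE g m k,
               (C.getD (bitsOf t ^^^ (1 <<< k), m) (0, [])).2 ++ [(k : Int)])) t []]
  rw [List.nil_append]
  have hfe : t.filter (fun m => !decide (m = 0 ∨ m = k)) = t.filter (fun m => !decide (m = k)) := by
    apply List.filter_congr
    intro m hm
    have h1 : 1 ≤ m := (List.mem_range'_1.mp (ht.mem hm)).1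
    simp; omega
  rw [hfe]
  rw [List.map_congr_left (fun m hm => ?_)]
  · exact (cell_spec ht hk (exists_other hnd hlen)).symm
  · rw [List.mem_filter] at hm
    have hmt := hm.1
    have hmk : m ≠ k := by have := hm.2; simpa using this
    rw [sound_getD hs (hprev m hmt hmk)]

theorem A_subset (g : List (List Int)) (n : Nat) (t : List Nat)
    (ht : t.Sublist (List.range' 1 (n - 1))) (hlen : 2 ≤ t.length) :
    ∀ (l : List Nat) (C : PySem.Dict (Nat × Nat) (Int × List Int)),
      (∀ x ∈ l, x ∈ t) → Sound g n C →
      (∀ k ∈ t, ∀ m ∈ t, m ≠ k → ((C.get? (bitsOf t ^^^ (1 <<< k), m)).isSome : Prop)) →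
      Sound g n (l.foldl (fun C k =>
        C.insert (bitsOf t, k) (pyMin (t.foldl (fun r m =>
          if m = 0 ∨ m = k then r
          else r ++ [((C.getD (bitsOf t ^^^ (1 <<< k), m) (0, [])).1 + gE g m k,
                      (C.getD (bitsOf t ^^^ (1 <<< k), m) (0, [])).2 ++ [(k : Int)])]) []))) C) ∧
      Keep C (l.foldl (fun C k =>
        C.insert (bitsOf t, k) (pyMin (t.foldl (fun r m =>
          if m = 0 ∨ m = k then r
          else r ++ [((C.getD (bitsOf t ^^^ (1 <<< k), m) (0, [])).1 + gE g m k,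
                      (C.getD (bitsOf t ^^^ (1 <<< k), m) (0, [])).2 ++ [(k : Int)])]) []))) C) ∧
      ∀ k ∈ l, (((l.foldl (fun C k =>
        C.insert (bitsOf t, k) (pyMin (t.foldl (fun r m =>
          if m = 0 ∨ m = k then r
          else r ++ [((C.getD (bitsOf t ^^^ (1 <<< k), m) (0, [])).1 + gE g m k,
                      (C.getD (bitsOf t ^^^ (1 <<< k), m) (0, [])).2 ++ [(k : Int)])]) []))) C).get?
        (bitsOf t, k)).isSome : Prop) := by
  intro l
  induction l with
  | nil => exact fun C _ hs _ => ⟨hs, keep_refl C, by simp⟩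
  | cons x xs ih =>
    intro C hmem hs hprev
    simp only [List.foldl_cons]
    have hval := A_val ht (hmem x List.mem_cons_self) hlen hs
      (hprev x (hmem x List.mem_cons_self))
    set C1 := C.insert (bitsOf t, x) (pyMin (t.foldl (fun r m =>
          if m = 0 ∨ m = x then r
          else r ++ [((C.getD (bitsOf t ^^^ (1 <<< x), m) (0, [])).1 + gE g m x,
                      (C.getD (bitsOf t ^^^ (1 <<< x), m) (0, [])).2 ++ [(x : Int)])]) [])) with hC1
    have hs1 : Sound g n C1 := sound_insert hs hval
    have hkeep1 : Keep C C1 := keep_insert C _ _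
    obtain ⟨ha, hb, hc⟩ := ih C1 (fun y hy => hmem y (List.mem_cons_of_mem _ hy)) hs1
      (fun k hk m hm hmk => hkeep1 _ (hprev k hk m hm hmk))
    refine ⟨ha, keep_trans hkeep1 hb, ?_⟩
    intro k hkmem
    rcases List.mem_cons.mp hkmem with h | h
    · subst h
      exact hb _ (isSome_insert_self C _ _)
    · exact hc k h

-- per-subset invariant for the combinations loop of stage s
theorem A_combos (g : List (List Int)) (n s : Nat) (hs2 : 2 ≤ s) :
    ∀ (L : List (List Nat)) (C : PySem.Dict (Nat × Nat) (Int × List Int)),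
      (∀ t ∈ L, t.Sublist (List.range' 1 (n - 1)) ∧ t.length = s) →
      Sound g n C → CompUpTo n C (s - 1) →
      Sound g n (L.foldl (fun C subset =>
        let bits := subset.foldl (fun b bit => b ||| (1 <<< bit)) 0
        subset.foldl (fun C k =>
          let prev := bits ^^^ (1 <<< k)
          let res := subset.foldl (fun r m =>
            if m = 0 ∨ m = k then r
            else r ++ [((C.getD (prev, m) (0, [])).1 + gE g m k,
                        (C.getD (prev, m) (0, [])).2 ++ [(k : Int)])])
            ([] : List (Int × List Int))
          C.insert (bits, k) (pyMin res)) C) C) ∧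
      Keep C (L.foldl (fun C subset =>
        let bits := subset.foldl (fun b bit => b ||| (1 <<< bit)) 0
        subset.foldl (fun C k =>
          let prev := bits ^^^ (1 <<< k)
          let res := subset.foldl (fun r m =>
            if m = 0 ∨ m = k then r
            else r ++ [((C.getD (prev, m) (0, [])).1 + gE g m k,
                        (C.getD (prev, m) (0, [])).2 ++ [(k : Int)])])
            ([] : List (Int × List Int))
          C.insert (bits, k) (pyMin res)) C) C) ∧
      ∀ t ∈ L, ∀ k ∈ t, (((L.foldl (fun C subset =>
        let bits := subset.foldl (fun b bit => b ||| (1 <<< bit)) 0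
        subset.foldl (fun C k =>
          let prev := bits ^^^ (1 <<< k)
          let res := subset.foldl (fun r m =>
            if m = 0 ∨ m = k then r
            else r ++ [((C.getD (prev, m) (0, [])).1 + gE g m k,
                        (C.getD (prev, m) (0, [])).2 ++ [(k : Int)])])
            ([] : List (Int × List Int))
          C.insert (bits, k) (pyMin res)) C) C).get? (bitsOf t, k)).isSome : Prop) := by
  intro L
  induction L with
  | nil => exact fun C _ hs _ => ⟨hs, keep_refl C, by simp⟩
  | cons t L' ih =>
    intro C hL hsound hcomp
    simp only [List.foldl_cons]
    obtain ⟨ht, hlen⟩ := hL t List.mem_cons_self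
    have hnd : t.Nodup := ht.nodup (List.nodup_range' ..)
    have hprev : ∀ k ∈ t, ∀ m ∈ t, m ≠ k →
        ((C.get? (bitsOf t ^^^ (1 <<< k), m)).isSome : Prop) := by
      intro k hk m hm hmk
      rw [prev_eq_bitsOf_filter hk]
      have ht' : (t.filter (fun m => !decide (m = k))).Sublist (List.range' 1 (n - 1)) :=
        (List.filter_sublist ..).trans ht
      have hm' : m ∈ t.filter (fun m => !decide (m = k)) := by
        rw [List.mem_filter]; exact ⟨hm, by simp [hmk]⟩
      have hl' := length_filter_ne hnd hk
      exact hcomp _ ht' (List.length_pos_of_mem hm') (by omega) m hm'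
    have hstep := A_subset g n t ht (by omega) t C (fun x hx => hx) hsound hprev
    obtain ⟨hs1, hk1, hc1⟩ := hstep
    obtain ⟨ha, hb, hc⟩ := ih _ (fun u hu => hL u (List.mem_cons_of_mem _ hu)) hs1
      (compUpTo_keep hcomp hk1)
    refine ⟨ha, keep_trans hk1 hb, ?_⟩
    intro u hu k hk
    rcases List.mem_cons.mp hu with h | h
    · subst h
      exact hb _ (hc1 k hk)
    · exact hc u h k hk

-- the stage loop: sizes a, a+1, …, a+cnt-1
theorem A_stages (g : List (List Int)) (n : Nat) :
    ∀ (cnt a : Nat) (C : PySem.Dict (Nat × Nat) (Int × List Int)), 2 ≤ a →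
      Sound g n C → CompUpTo n C (a - 1) →
      Sound g n ((List.range' a cnt).foldl (fun C s =>
        (PySem.List.combinations (List.range' 1 (n - 1)) s).foldl (fun C subset =>
          let bits := subset.foldl (fun b bit => b ||| (1 <<< bit)) 0
          subset.foldl (fun C k =>
            let prev := bits ^^^ (1 <<< k)
            let res := subset.foldl (fun r m =>
              if m = 0 ∨ m = k then r
              else r ++ [((C.getD (prev, m) (0, [])).1 + gE g m k,
                          (C.getD (prev, m) (0, [])).2 ++ [(k : Int)])])
              ([] : List (Int × List Int))
            C.insert (bits, k) (pyMin res)) C) C) C) ∧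
      CompUpTo n ((List.range' a cnt).foldl (fun C s =>
        (PySem.List.combinations (List.range' 1 (n - 1)) s).foldl (fun C subset =>
          let bits := subset.foldl (fun b bit => b ||| (1 <<< bit)) 0
          subset.foldl (fun C k =>
            let prev := bits ^^^ (1 <<< k)
            let res := subset.foldl (fun r m =>
              if m = 0 ∨ m = k then r
              else r ++ [((C.getD (prev, m) (0, [])).1 + gE g m k,
                          (C.getD (prev, m) (0, [])).2 ++ [(k : Int)])])
              ([] : List (Int × List Int))
            C.insert (bits, k) (pyMin res)) C) C) C) (a - 1 + cnt) := by
  intro cnt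
  induction cnt with
  | zero => exact fun a C _ hs hc => ⟨hs, by simpa using hc⟩
  | succ m ih =>
    intro a C ha hs hc
    rw [List.range'_succ]
    simp only [List.foldl_cons]
    have hcomb := A_combos g n a ha (PySem.List.combinations (List.range' 1 (n - 1)) a) C
      (fun t htm => by
        have := (PySem.List.mem_combinations_iff (List.range' 1 (n - 1)) a t).mp htm
        exact ⟨this.1, this.2⟩) hs hc
    obtain ⟨hs1, hk1, hc1⟩ := hcomb
    obtain ⟨ha2, hb2⟩ := ih (a + 1) _ (by omega) hs1 (fun t ht h1 h2 k hk => by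
      by_cases hsz : t.length ≤ a - 1
      · exact hk1 _ (hc t ht h1 hsz k hk)
      · have hts : t.length = a := by omega
        exact hc1 t ((PySem.List.mem_combinations_iff (List.range' 1 (n - 1)) a t).mpr
          ⟨ht, hts⟩) k hk)
    exact ⟨ha2, by
      have : a + 1 - 1 + m = a - 1 + (m + 1) := by omega
      rw [this] at hb2
      exact hb2⟩

-- ---- final assembly ----

-- the common value both programs compute (n = graph length)
def finalAnswer (g : List (List Int)) (n : Nat) : Int × List Int :=
  pyMin ((List.range' 1 (n - 1)).map (fun k =>
    ((bestSpec g n (2 ^ n - 2) k).1 + gE g k 0,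
     (bestSpec g n (2 ^ n - 2) k).2 ++ [(0 : Int)])))

-- the final loop of A over an arbitrary dict whose full-mask entries are present and sound
theorem final_fold_eq (g : List (List Int)) (n : Nat) (h2 : 2 ≤ n)
    (C : PySem.Dict (Nat × Nat) (Int × List Int)) (hs : Sound g n C)
    (hcomp : ∀ k ∈ List.range' 1 (n - 1), ((C.get? (2 ^ n - 2, k)).isSome : Prop)) :
    pyMin ((List.range' 1 (n - 1)).foldl (fun r k =>
      r ++ [((C.getD (2 ^ n - 1 - 1, k) (0, [])).1 + gE g k 0,
             (C.getD (2 ^ n - 1 - 1, k) (0, [])).2 ++ [(0 : Int)])]) []) = finalAnswer g n := by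
  have hsub : 2 ^ n - 1 - 1 = 2 ^ n - 2 := by omega
  rw [hsub, PySem.List.foldl_append_singleton_eq_map, List.nil_append]
  unfold finalAnswer
  congr 1
  apply List.map_congr_left
  intro k hk
  rw [sound_getD hs (hcomp k hk)]

theorem A_result (g : List (List Int)) (h2 : 2 ≤ g.length) :
    held_karp_tsp g = finalAnswer g g.length := by
  have hempty : Sound g g.length (PySem.Dict.empty : PySem.Dict (Nat × Nat) (Int × List Int)) := by
    intro mask k v h
    rw [PySem.Dict.get?_empty] at h
    cases h
  obtain ⟨hs0, hk0, hb0⟩ := A_base g g.length (List.range' 1 (g.length - 1))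
    PySem.Dict.empty hempty
  have hcomp1 : CompUpTo g.length ((List.range' 1 (g.length - 1)).foldl
      (fun C k => C.insert (1 <<< k, k) (gE g 0 k, [0, (k : Int)])) PySem.Dict.empty) 1 := by
    intro t ht hl1 hl2 k hk
    have hone : t.length = 1 := by omega
    obtain ⟨j, hj⟩ := List.length_eq_one_iff.mp hone
    subst hj
    have hkj : k = j := by
      exact List.mem_singleton.mp hk
    subst hkj
    have hbits : bitsOf [k] = 1 <<< k := by
      show (0 ||| (1 <<< k)) = 1 <<< k
      exact Nat.zero_or _
    rw [hbits]
    exact hb0 k (ht.mem (List.mem_singleton_self k))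
  obtain ⟨hsA, hcompA⟩ := A_stages g g.length (g.length - 2) 2 _ (by omega) hs0
    (by simpa using hcomp1)
  have hFsome : ∀ k ∈ List.range' 1 (g.length - 1),
      ((((List.range' 2 (g.length - 2)).foldl (fun C s =>
        (PySem.List.combinations (List.range' 1 (g.length - 1)) s).foldl (fun C subset =>
          let bits := subset.foldl (fun b bit => b ||| (1 <<< bit)) 0
          subset.foldl (fun C k =>
            let prev := bits ^^^ (1 <<< k)
            let res := subset.foldl (fun r m =>
              if m = 0 ∨ m = k then r
              else r ++ [((C.getD (prev, m) (0, [])).1 + gE g m k,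
                          (C.getD (prev, m) (0, [])).2 ++ [(k : Int)])])
              ([] : List (Int × List Int))
            C.insert (bits, k) (pyMin res)) C) C)
        ((List.range' 1 (g.length - 1)).foldl
          (fun C k => C.insert (1 <<< k, k) (gE g 0 k, [0, (k : Int)])) PySem.Dict.empty)).get?
        (2 ^ g.length - 2, k)).isSome : Prop) := by
    intro k hk
    have := hcompA (List.range' 1 (g.length - 1)) (List.Sublist.refl _)
      (by rw [List.length_range']; omega) (by rw [List.length_range']; omega) k hk
    rwa [bitsOf_range'] at this
  exact final_fold_eq g g.length h2 _ hsA hFsome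

theorem B_result (g : List (List Int)) (h2 : 2 ≤ g.length) :
    held_karp_tsp_alt g = finalAnswer g g.length := by
  unfold held_karp_tsp_alt finalAnswer
  simp only []
  congr 1
  apply List.map_congr_left
  intro k hk
  have hkm := List.mem_range'_1.mp hk
  have htb : (2 ^ g.length - 2).testBit k = true := by
    rw [testBit_two_pow_sub_two]
    have : 1 ≤ k ∧ k < g.length := ⟨hkm.1, by omega⟩
    simp [this]
  have hlt : 2 ^ g.length - 2 < 2 ^ g.length := by
    have : (1:Nat) ≤ 2 ^ g.length := Nat.one_le_two_pow
    omega
  rw [bestB_congr g g.length (2 ^ g.length - 2) (2 ^ g.length) ((2 ^ g.length - 2) + 1) k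
    htb hlt (by omega)]
  rfl

-- ===== VERDICT (by name: the statement is the Claim_ definition above) =====
theorem held_karp_tsp_spec : Claim_equal_held_karp_tsp := by
  intro graph _ hpre
  unfold Spec_held_karp_tsp
  rw [A_result graph hpre.1, B_result graph hpre.1]
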